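-- pv_equiv track=rewrite | github.com/The-Celestino/ILP---UFBA---2022 | PROVA 03/RESPOSTAS/q2_código_resposta.py | contar_clientes_consumo
-- ===== SOURCE A (Python) =====
-- def contar_clientes_consumo(n, m, consumos, consultas):
--     resultado = []
--
--     # Ordenar a lista de consumos em ordem crescente
--
--     for valor, criterio in consultas:
--         contador = 0
--
--         if criterio == 'leq':
--             contador = busca_binaria_menor_igual(consumos, valor)
--         elif criterio == 'geq':
--             contador = m - busca_binaria_menor_igual(consumos, valor - 1)
--
--         resultado.append(contador)
--
--     return resultado
--
-- def busca_binaria_menor_igual(lista, valor):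
--     esquerda = 0
--     direita = len(lista) - 1
--     indice = -1
--
--     while esquerda <= direita:
--         meio = (esquerda + direita) // 2
--
--         if lista[meio] <= valor:
--             indice = meio
--             esquerda = meio + 1
--         else:
--             direita = meio - 1
--
--     return indice + 1
-- ===== SOURCE B (Python) =====
-- def contar_clientes_consumo(n, m, consumos, consultas):
--     hi = len(consumos) - 1
--
--     # count by summing left-segment sizes; no best-index state
--     def conta(valor, lo, hi):
--         if lo > hi:
--             return 0
--         meio = (lo + hi) // 2
--         if consumos[meio] <= valor:
--             return (meio - lo + 1) + conta(valor, meio + 1, hi)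
--         return conta(valor, lo, meio - 1)
--
--     def resolve(valor, criterio):
--         if criterio == 'leq':
--             return conta(valor, 0, hi)
--         if criterio == 'geq':
--             return m - conta(valor - 1, 0, hi)
--         return 0
--
--     return [resolve(valor, criterio) for valor, criterio in consultas]
-- ===== Notes on version B (the rewrite author's own statement) =====
-- stated objective: alternative
-- what changed: The binary-search helper no longer tracks a best-match index through an iterative loop; B's recursive helper returns the count directly by adding the size of the discarded left segment (meio - lo + 1) on each successful comparison, and the outer loop becomes a comprehension over a dispatch function.
import Mathlib
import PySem

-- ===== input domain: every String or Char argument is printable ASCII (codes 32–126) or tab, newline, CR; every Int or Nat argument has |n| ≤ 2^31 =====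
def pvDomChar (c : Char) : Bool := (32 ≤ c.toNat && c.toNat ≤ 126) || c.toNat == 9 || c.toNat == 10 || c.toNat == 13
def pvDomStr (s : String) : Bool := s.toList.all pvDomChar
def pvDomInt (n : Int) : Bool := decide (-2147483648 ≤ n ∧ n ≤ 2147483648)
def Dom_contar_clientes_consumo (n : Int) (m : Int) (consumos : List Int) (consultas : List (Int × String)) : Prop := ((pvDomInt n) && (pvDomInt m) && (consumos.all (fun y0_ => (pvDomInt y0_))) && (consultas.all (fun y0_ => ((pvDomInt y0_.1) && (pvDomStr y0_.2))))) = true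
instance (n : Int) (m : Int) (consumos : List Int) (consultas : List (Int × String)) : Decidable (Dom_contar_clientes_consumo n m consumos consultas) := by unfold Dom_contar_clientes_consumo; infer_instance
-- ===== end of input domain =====

-- B replaces A's iterative best-index binary search by a recursion that sums discarded
-- left-segment sizes directly (objective: alternative decomposition, same cost).

-- ===== PORT A =====
-- the while-loop of busca_binaria_menor_igual, state (esquerda, direita, indice)
def pvBuscaLoop (lista : List Int) (valor : Int) (esquerda direita indice : Int) : Int :=
  if h : esquerda ≤ direita then
    let meio := PySem.Int.floordiv (esquerda + direita) 2
    match PySem.List.pyGet? lista meio with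
    | some x =>
        if x ≤ valor then pvBuscaLoop lista valor (meio + 1) direita meio
        else pvBuscaLoop lista valor esquerda (meio - 1) indice
    | none => indice + 1  -- Python would raise IndexError; unreachable from the top-level call (meio stays in [0, len-1])
  else indice + 1
termination_by (direita + 1 - esquerda).toNat
decreasing_by
  · have := PySem.Int.floordiv_two_mid_bounds h; omega
  · have := PySem.Int.floordiv_two_mid_bounds h; omega

def busca_binaria_menor_igual (lista : List Int) (valor : Int) : Int :=
  pvBuscaLoop lista valor 0 ((lista.length : Int) - 1) (-1)

def contar_clientes_consumo (n : Int) (m : Int) (consumos : List Int) (consultas : List (Int × String)) : List Int :=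
  consultas.foldl
    (fun resultado vc =>
      let contador : Int := 0
      let contador :=
        if vc.2 == "leq" then busca_binaria_menor_igual consumos vc.1
        else if vc.2 == "geq" then m - busca_binaria_menor_igual consumos (vc.1 - 1)
        else contador
      resultado ++ [contador])
    []

-- ===== PORT B =====
-- count directly: each successful comparison contributes the whole left segment
def pvConta (consumos : List Int) (valor lo hi : Int) : Int :=
  if h : lo > hi then 0
  else
    let meio := PySem.Int.floordiv (lo + hi) 2
    match PySem.List.pyGet? consumos meio with
    | some x =>
        if x ≤ valor then (meio - lo + 1) + pvConta consumos valor (meio + 1) hi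
        else pvConta consumos valor lo (meio - 1)
    | none => 0  -- Python would raise IndexError; unreachable from the top-level call
termination_by (hi + 1 - lo).toNat
decreasing_by
  · have := PySem.Int.floordiv_two_mid_bounds (by omega : lo ≤ hi); omega
  · have := PySem.Int.floordiv_two_mid_bounds (by omega : lo ≤ hi); omega

def contar_clientes_consumo_alt (n : Int) (m : Int) (consumos : List Int) (consultas : List (Int × String)) : List Int :=
  let hi := (consumos.length : Int) - 1
  consultas.map (fun vc =>
    if vc.2 == "leq" then pvConta consumos vc.1 0 hi
    else if vc.2 == "geq" then m - pvConta consumos (vc.1 - 1) 0 hi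
    else 0)

-- ===== PRECONDITION & SPEC =====
def Spec_contar_clientes_consumo (n : Int) (m : Int) (consumos : List Int) (consultas : List (Int × String)) (out : List Int) : Prop := out = contar_clientes_consumo_alt n m consumos consultas
instance (n : Int) (m : Int) (consumos : List Int) (consultas : List (Int × String)) (out : List Int) : Decidable (Spec_contar_clientes_consumo n m consumos consultas out) := by unfold Spec_contar_clientes_consumo; infer_instance

-- ===== CLAIM (what is proved, stated in full; the proofs are below) =====
def Claim_equal_contar_clientes_consumo : Prop := ∀ (n : Int) (m : Int) (consumos : List Int) (consultas : List (Int × String)), Dom_contar_clientes_consumo n m consumos consultas → Spec_contar_clientes_consumo n m consumos consultas (contar_clientes_consumo n m consumos consultas)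

-- ===== LEMMAS AND PROOFS =====

-- core invariant: whenever A's loop is entered with indice = esquerda - 1 (which the
-- loop preserves), its result is esquerda + B's segment-sum count; any comparison
-- outcomes are allowed, so this also holds for unsorted lists.
theorem pvBusca_eq_conta (lista : List Int) (valor : Int) :
    ∀ (k : Nat) (lo hi : Int), (hi + 1 - lo).toNat = k →
      pvBuscaLoop lista valor lo hi (lo - 1) = lo + pvConta lista valor lo hi := by
  intro k
  induction k using Nat.strong_induction_on with
  | _ k ih =>
    intro lo hi hk
    rw [pvBuscaLoop, pvConta]
    by_cases h : lo ≤ hi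
    · have hmid := PySem.Int.floordiv_two_mid_bounds h
      simp only [dif_pos h, dif_neg (by omega : ¬ lo > hi)]
      set meio := PySem.Int.floordiv (lo + hi) 2 with hm
      cases hg : PySem.List.pyGet? lista meio with
      | none => dsimp only; omega
      | some x =>
        dsimp only
        by_cases hx : x ≤ valor
        · simp only [if_pos hx]
          have key : pvBuscaLoop lista valor (meio + 1) hi ((meio + 1) - 1)
              = (meio + 1) + pvConta lista valor (meio + 1) hi := by
            exact ih (hi + 1 - (meio + 1)).toNat (by omega) _ _ rfl
          rw [show meio + 1 - 1 = meio from by ring] at key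
          omega
        · simp only [if_neg hx]
          have key : pvBuscaLoop lista valor lo (meio - 1) (lo - 1)
              = lo + pvConta lista valor lo (meio - 1) := by
            exact ih ((meio - 1) + 1 - lo).toNat (by omega) _ _ rfl
          omega
    · simp only [dif_neg h, dif_pos (by omega : lo > hi)]
      omega

theorem busca_eq_conta (lista : List Int) (valor : Int) :
    busca_binaria_menor_igual lista valor = pvConta lista valor 0 ((lista.length : Int) - 1) := by
  have := pvBusca_eq_conta lista valor ((lista.length : Int) - 1 + 1 - 0).toNat 0 ((lista.length : Int) - 1) rfl
  simpa [busca_binaria_menor_igual] using this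

theorem foldl_append_map {α : Type} (f : α → Int) :
    ∀ (l : List α) (acc : List Int),
      l.foldl (fun r x => r ++ [f x]) acc = acc ++ l.map f := by
  intro l
  induction l with
  | nil => simp
  | cons x xs ihx => intro acc; simp [List.foldl, ihx]

-- ===== VERDICT (by name: the statement is the Claim_ definition above) =====
theorem contar_clientes_consumo_spec : Claim_equal_contar_clientes_consumo := by
  intro n m consumos consultas _
  unfold Spec_contar_clientes_consumo contar_clientes_consumo contar_clientes_consumo_alt
  rw [foldl_append_map]
  simp only [List.nil_append]
  apply List.map_congr_left
  intro vc _
  by_cases h1 : vc.2 == "leq"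
  · simp [h1, busca_eq_conta]
  · by_cases h2 : vc.2 == "geq" <;> simp [h1, h2, busca_eq_conta]
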